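-- pv_equiv track=rewrite | github.com/Hyehwan-dev/myfirstgithub | code festival Q86.py | favorite_sushi
-- ===== SOURCE A (Python) =====
-- def favorite_sushi(sushi_list, n):
--     index = n-1
--     count = 0
--     grade_list = sorted(sushi_list)
--
--     while True :
--         sushi = sushi_list.pop(0)
--         if grade_list[0] == sushi :
--             if index == 0:
--                 break
--             index -= 1
--             grade_list.pop(0)
--         else:
--             sushi_list.append(sushi)
--             index = len(sushi_list) - 1 if index == 0 else index-1
--         count+=1
--
--     return count
-- ===== SOURCE B (Python) =====
-- # Serve-by-serve jumps: instead of rotating the queue one pop at a time, locate the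
-- # next served element (first occurrence of the current minimum) and account for the
-- # whole segment of pops in one arithmetic step and one slice; no sorted copy is kept.
-- # A empties sushi_list in place; B leaves it unmutated (return values are what agree).
-- def favorite_sushi(sushi_list, n):
--     queue = list(sushi_list)
--     idx = n - 1
--     cnt = 0
--     while True:
--         k = queue.index(min(queue))
--         if idx == k:
--             return cnt + k
--         rest_len = len(queue) - k - 1
--         idx = idx - k - 1 if idx > k else rest_len + idx
--         queue = queue[k+1:] + queue[:k]
--         cnt += k + 1
-- ===== Notes on version B (the rewrite author's own statement) =====
-- stated objective: faster
-- what changed: Instead of simulating every pop on a rotating queue against a sorted copy, B jumps serve-by-serve: each iteration finds the first occurrence of the current minimum, accounts for the whole segment of pops with one arithmetic index update, and rotates the queue with one slice; no sorted list is kept at all.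
-- outside the precondition, e.g. on favorite_sushi([2, 1], 3): A returns 2, B returns 2; on favorite_sushi([], 1): A raises IndexError, B raises ValueError
import Mathlib
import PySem

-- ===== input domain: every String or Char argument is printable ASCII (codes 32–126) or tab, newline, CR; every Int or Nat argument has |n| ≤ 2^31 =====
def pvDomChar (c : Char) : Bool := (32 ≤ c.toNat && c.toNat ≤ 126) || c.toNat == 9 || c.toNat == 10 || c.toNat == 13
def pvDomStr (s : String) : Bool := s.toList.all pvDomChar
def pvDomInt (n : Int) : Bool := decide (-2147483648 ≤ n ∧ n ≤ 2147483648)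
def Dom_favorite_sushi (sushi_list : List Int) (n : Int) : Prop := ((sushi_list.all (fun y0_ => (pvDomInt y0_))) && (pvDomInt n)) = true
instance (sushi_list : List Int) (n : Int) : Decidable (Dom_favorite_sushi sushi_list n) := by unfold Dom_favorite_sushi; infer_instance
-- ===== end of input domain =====

-- B replaces A's pop-by-pop rotating-queue simulation (with a sorted shadow list) by
-- serve-by-serve jumps: each iteration locates the first occurrence of the current
-- minimum and accounts for the whole segment of pops arithmetically; asymptotically
-- faster. A also empties sushi_list in place; B does not (return values are compared).

-- ===== PORT A =====
-- while True: pop(0); compare with grade_list[0]; serve or recycle.  The loop is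
-- totalized with fuel (len+1)^2, which exceeds the number of iterations on every
-- input admitted by Pre_; 0 is returned only off-fuel / where Python raises IndexError.
def fsLoopA : Nat → List Int → List Int → Int → Int → Int
  | 0, _, _, _, _ => 0
  | _ + 1, [], _, _, _ => 0                    -- sushi_list.pop(0) raises IndexError
  | f + 1, sushi :: rest, grade_list, index, count =>
    match grade_list with
    | [] => 0                                  -- grade_list[0] raises IndexError
    | g :: gr =>
      if g == sushi then
        if index == 0 then count
        else fsLoopA f rest gr (index - 1) (count + 1)
      else
        fsLoopA f (rest ++ [sushi]) (g :: gr)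
          (if index == 0 then ((rest ++ [sushi]).length : Int) - 1 else index - 1)
          (count + 1)

def favorite_sushi (sushi_list : List Int) (n : Int) : Int :=
  fsLoopA ((sushi_list.length + 1) * (sushi_list.length + 1)) sushi_list
    (PySem.List.sorted sushi_list (fun x => x) false) (n - 1) 0

-- ===== PORT B =====
-- Source B's while True, totalized with fuel len+1 (the queue shrinks by one per
-- iteration); 0 is returned only off-fuel / where Python min([]) raises ValueError.
def fsGoB : Nat → List Int → Int → Int → Int
  | 0, _, _, _ => 0
  | f + 1, queue, idx, cnt =>
    match PySem.List.min? queue (fun x => x) with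
    | none => 0                                -- min([]) raises ValueError
    | some m =>
      match PySem.List.index? queue m with
      | none => 0                              -- unreachable: m ∈ queue
      | some k =>
        if idx == (k : Int) then cnt + (k : Int)
        else  -- rest_len = len(queue) - k - 1 is inlined below
          fsGoB f
            (PySem.List.slice queue (some ((k : Int) + 1)) none ++
             PySem.List.slice queue none (some (k : Int)))
            (if idx > (k : Int) then idx - (k : Int) - 1
             else ((queue.length : Int) - (k : Int) - 1) + idx)
            (cnt + (k : Int) + 1)

def favorite_sushi_alt (sushi_list : List Int) (n : Int) : Int :=
  fsGoB (sushi_list.length + 1) sushi_list (n - 1) 0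

-- ===== PRECONDITION & SPEC =====
-- Pre_ restricts n to the natural 1-based positions 1..len(sushi_list): outside that
-- range the target position is meaningless and A usually raises IndexError, though on
-- some arrangements index-wraparound lets it return an accidental count (which B then
-- also returns); B may instead raise ValueError where A raises IndexError.
def Pre_favorite_sushi (sushi_list : List Int) (n : Int) : Prop :=
  1 ≤ n ∧ n ≤ sushi_list.length

instance (sushi_list : List Int) (n : Int) : Decidable (Pre_favorite_sushi sushi_list n) := by
  unfold Pre_favorite_sushi; infer_instance

def pvWitness_favorite_sushi : List Int × Int := ([3, 1, 2], 2)

def Spec_favorite_sushi (sushi_list : List Int) (n : Int) (out : Int) : Prop := out = favorite_sushi_alt sushi_list n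
instance (sushi_list : List Int) (n : Int) (out : Int) : Decidable (Spec_favorite_sushi sushi_list n out) := by unfold Spec_favorite_sushi; infer_instance

-- ===== CLAIM (what is proved, stated in full; the proofs are below) =====
def Claim_equal_favorite_sushi : Prop := ∀ (sushi_list : List Int) (n : Int), Dom_favorite_sushi sushi_list n → Pre_favorite_sushi sushi_list n → Spec_favorite_sushi sushi_list n (favorite_sushi sushi_list n)

-- ===== LEMMAS AND PROOFS =====

-- A's behaviour across one full serve segment: the k = |xs| leading elements are all
-- ≠ the minimum v, so A recycles them one by one and then serves v.
theorem fsLoopA_segment (v : Int) :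
    ∀ (xs ys gr : List Int) (idx cnt : Int) (f : Nat),
      (∀ x ∈ xs, x ≠ v) → 0 ≤ idx → xs.length + 1 ≤ f →
      fsLoopA f (xs ++ v :: ys) (v :: gr) idx cnt =
        if idx = (xs.length : Int) then cnt + xs.length
        else fsLoopA (f - (xs.length + 1)) (ys ++ xs) gr
          (if idx > (xs.length : Int) then idx - xs.length - 1 else (ys.length : Int) + idx)
          (cnt + xs.length + 1) := by
  intro xs
  induction xs with
  | nil =>
    intro ys gr idx cnt f _ hidx hf
    obtain ⟨f', rfl⟩ : ∃ f', f = f' + 1 := ⟨f - 1, by omega⟩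
    by_cases h0 : idx = 0
    · simp [fsLoopA, h0]
    · have h1 : idx > (0 : Int) := by omega
      simp only [List.nil_append, List.length_nil, Nat.cast_zero, List.append_nil]
      rw [if_neg h0, if_pos h1]
      simp only [fsLoopA, beq_self_eq_true, if_true,
        show (idx == 0) = false by simp [h0], Bool.false_eq_true, if_false]
      congr 1 <;> omega
  | cons x xs ih =>
    intro ys gr idx cnt f hne hidx hf
    obtain ⟨f', rfl⟩ : ∃ f', f = f' + 1 := ⟨f - 1, by omega⟩
    have hxv : (v == x) = false := by
      simp only [beq_eq_false_iff_ne]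
      exact fun h => hne x (by simp) h.symm
    have step : fsLoopA (f' + 1) ((x :: xs) ++ v :: ys) (v :: gr) idx cnt =
        fsLoopA f' (xs ++ v :: (ys ++ [x])) (v :: gr)
          (if idx == 0 then (((xs ++ v :: ys) ++ [x]).length : Int) - 1 else idx - 1)
          (cnt + 1) := by
      simp only [List.cons_append, fsLoopA, hxv, Bool.false_eq_true, if_false]
      congr 1 <;> simp
    rw [step]
    have hne' : ∀ y ∈ xs, y ≠ v := fun y hy => hne y (by simp [hy])
    have hf' : xs.length + 1 ≤ f' := by simp at hf; omega
    by_cases h0 : idx = 0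
    · -- the target itself is recycled to the back of the queue
      have hi2 : (if idx == 0 then (((xs ++ v :: ys) ++ [x]).length : Int) - 1 else idx - 1)
          = (xs.length : Int) + ys.length + 1 := by
        rw [if_pos (by simp [h0] : (idx == 0) = true)]
        simp only [List.length_append, List.length_cons, List.length_nil]
        push_cast; omega
      rw [hi2, ih (ys ++ [x]) gr _ (cnt + 1) f' hne' (by positivity) hf']
      rw [if_neg (by push_cast; omega),
          if_pos (by push_cast; omega),
          if_neg (by simp only [List.length_cons]; push_cast; omega),
          if_neg (by simp only [List.length_cons]; push_cast; omega)]
      congr 1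
      all_goals first
        | rfl
        | (simp only [List.append_assoc, List.cons_append, List.nil_append])
        | ((try simp only [List.length_cons, List.length_append, List.length_nil]); push_cast; omega)
    · have hi2 : (if idx == 0 then (((xs ++ v :: ys) ++ [x]).length : Int) - 1 else idx - 1)
          = idx - 1 := by rw [if_neg (by simp [h0])]
      rw [hi2, ih (ys ++ [x]) gr (idx - 1) (cnt + 1) f' hne' (by omega) hf']
      by_cases hc : idx = ((x :: xs).length : Int)
      · rw [if_pos (by (try simp only [List.length_cons] at hc ⊢); push_cast at hc ⊢; omega), if_pos hc]
        (try simp only [List.length_cons] at hc ⊢); push_cast at hc ⊢; omega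
      · rw [if_neg (by (try simp only [List.length_cons] at hc ⊢); push_cast at hc ⊢; omega), if_neg hc]
        by_cases hgt : idx > ((x :: xs).length : Int)
        · rw [if_pos (by (try simp only [List.length_cons] at hgt ⊢); push_cast at hgt ⊢; omega), if_pos hgt]
          congr 1
          all_goals first
            | rfl
            | (simp only [List.append_assoc, List.cons_append, List.nil_append])
            | ((try simp only [List.length_cons, List.length_append, List.length_nil]); push_cast; omega)
        · rw [if_neg (by (try simp only [List.length_cons] at hgt ⊢); push_cast at hgt ⊢; omega), if_neg hgt]
          congr 1
          all_goals first
            | rfl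
            | (simp only [List.append_assoc, List.cons_append, List.nil_append])
            | ((try simp only [List.length_cons, List.length_append, List.length_nil]); push_cast; omega)

-- sorted(q) for q = xs ++ v :: ys with v minimal: head v, tail sorted(ys ++ xs)
theorem sorted_head_min (xs ys : List Int) (v : Int)
    (hmin : ∀ y ∈ xs ++ v :: ys, v ≤ y) :
    PySem.List.sorted (xs ++ v :: ys) (fun x => x) false =
      v :: PySem.List.sorted (ys ++ xs) (fun x => x) false := by
  apply PySem.List.sorted_id_eq_of_perm_of_pairwise
  · have h1 : (PySem.List.sorted (ys ++ xs) (fun x => x) false).Perm (ys ++ xs) :=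
      PySem.List.sorted_perm _ _ _
    refine (List.Perm.cons v h1).trans ?_
    refine (List.Perm.cons v (List.perm_append_comm)).trans ?_
    exact List.perm_middle.symm
  · refine List.pairwise_cons.mpr ⟨?_, ?_⟩
    · intro y hy
      have : y ∈ ys ++ xs := (PySem.List.mem_sorted _ _ _ _).mp hy
      apply hmin
      rcases List.mem_append.mp this with h | h
      · exact List.mem_append.mpr (Or.inr (List.mem_cons_of_mem _ h))
      · exact List.mem_append.mpr (Or.inl h)
    · exact PySem.List.sorted_pairwise _ _

-- the two loops agree, by induction on the number of remaining elements
theorem fs_main : ∀ (len : Nat) (queue : List Int) (idx cnt : Int) (fA fB : Nat),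
    queue.length = len → 0 ≤ idx → idx < (queue.length : Int) →
    len ≤ fB → queue.length * (queue.length + 1) ≤ fA →
    fsLoopA fA queue (PySem.List.sorted queue (fun x => x) false) idx cnt
      = fsGoB fB queue idx cnt := by
  intro len
  induction len with
  | zero =>
    intro queue idx cnt fA fB hlen h0 hlt _ _
    rw [List.length_eq_zero_iff] at hlen
    subst hlen
    simp at hlt; omega
  | succ len ih =>
    intro queue idx cnt fA fB hlen h0 hlt hfB hfA
    obtain ⟨fB', rfl⟩ : ∃ fB', fB = fB' + 1 := ⟨fB - 1, by omega⟩
    have hne : queue ≠ [] := by intro h; subst h; simp at hlen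
    obtain ⟨m, hm⟩ : ∃ m, PySem.List.min? queue (fun x => x) = some m := by
      cases hmin : PySem.List.min? queue (fun x => x) with
      | none => exact absurd ((PySem.List.min?_eq_none_iff _ _).mp hmin) hne
      | some m => exact ⟨m, rfl⟩
    have hmin : ∀ y ∈ queue, m ≤ y := by
      have := PySem.List.min?_isMin hm; simpa using this
    have hmem : m ∈ queue := PySem.List.min?_mem hm
    obtain ⟨k, hk⟩ : ∃ k, PySem.List.index? queue m = some k := by
      cases hidx : PySem.List.index? queue m with
      | none => exact absurd ((PySem.List.index?_eq_none_iff _ _).mp hidx) (by simp [hmem])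
      | some k => exact ⟨k, rfl⟩
    obtain ⟨pre, suf, hq, hkl, hnotin⟩ := (PySem.List.index?_eq_some_iff _ _ _).mp hk
    subst hkl
    subst hq
    have hql : (pre ++ m :: suf).length = pre.length + suf.length + 1 := by
      simp only [List.length_append, List.length_cons]; omega
    have hsorted : PySem.List.sorted (pre ++ m :: suf) (fun x => x) false
        = m :: PySem.List.sorted (suf ++ pre) (fun x => x) false :=
      sorted_head_min pre suf m hmin
    have hP : (pre ++ m :: suf).length ≤ (pre ++ m :: suf).length * ((pre ++ m :: suf).length + 1) :=
      Nat.le_mul_of_pos_right _ (by omega)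
    have hA := fsLoopA_segment m pre suf
      (PySem.List.sorted (suf ++ pre) (fun x => x) false) idx cnt fA
      (fun x hx he => hnotin (he ▸ hx)) h0 (by omega)
    -- reduce the B side one step
    have hdrop : (pre ++ m :: suf).drop (pre.length + 1) = suf := by
      rw [show pre ++ m :: suf = (pre ++ [m]) ++ suf by simp,
          show pre.length + 1 = (pre ++ [m]).length by simp]
      exact List.drop_left
    have htake : (pre ++ m :: suf).take pre.length = pre := List.take_left
    have hc1 : ((pre.length : Int) + 1) = ((pre.length + 1 : Nat) : Int) := by push_cast; ring
    have hB : fsGoB (fB' + 1) (pre ++ m :: suf) idx cnt =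
        if idx == (pre.length : Int) then cnt + pre.length
        else fsGoB fB' (suf ++ pre)
          (if idx > (pre.length : Int) then idx - pre.length - 1
           else (((pre ++ m :: suf).length : Int) - pre.length - 1) + idx)
          (cnt + pre.length + 1) := by
      simp only [fsGoB, hm, hk]
      rw [show PySem.List.slice (pre ++ m :: suf) (some ((pre.length : Int) + 1)) none = suf from by
            rw [hc1, PySem.List.slice_from_natCast, hdrop],
          show PySem.List.slice (pre ++ m :: suf) none (some (pre.length : Int)) = pre from by
            rw [PySem.List.slice_to_natCast, htake]]
    rw [hB, hsorted, hA]
    by_cases he : idx = (pre.length : Int)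
    · rw [if_pos he, if_pos (beq_iff_eq.mpr he)]
    · rw [if_neg he, if_neg (show ¬((idx == (pre.length : Int)) = true) by simpa using he)]
      have hql' : (((pre ++ m :: suf).length : Int) - pre.length - 1) = (suf.length : Int) := by
        rw [hql]; push_cast; ring
      rw [hql']
      have hlt' : idx < (pre.length : Int) + suf.length + 1 := by
        simp only [List.length_append, List.length_cons] at hlt
        push_cast at hlt; omega
      have hfuel : len * (len + 1) ≤ fA - (pre.length + 1) := by
        have e1 : (len + 1) * (len + 1 + 1) = len * (len + 1) + 2 * (len + 1) := by ring
        rw [hlen] at hfA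
        have e3 : pre.length + 1 ≤ len + 1 := by
          rw [← hlen]; simp only [List.length_append, List.length_cons]; omega
        omega
      by_cases hgt : idx > (pre.length : Int)
      · rw [if_pos hgt]
        exact ih (suf ++ pre) (idx - pre.length - 1) (cnt + pre.length + 1)
          (fA - (pre.length + 1)) fB'
          (by simp only [List.length_append]; omega) (by omega)
          (by simp only [List.length_append]; push_cast; omega)
          (by omega)
          (by have e2 : (suf ++ pre).length * ((suf ++ pre).length + 1) = len * (len + 1) := by
                congr 1 <;> simp only [List.length_append] <;> omega
              rw [e2]; exact hfuel)
      · rw [if_neg hgt]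
        exact ih (suf ++ pre) ((suf.length : Int) + idx) (cnt + pre.length + 1)
          (fA - (pre.length + 1)) fB'
          (by simp only [List.length_append]; omega) (by omega)
          (by simp only [List.length_append]; push_cast; omega)
          (by omega)
          (by have e2 : (suf ++ pre).length * ((suf ++ pre).length + 1) = len * (len + 1) := by
                congr 1 <;> simp only [List.length_append] <;> omega
              rw [e2]; exact hfuel)

-- ===== VERDICT (by name: the statement is the Claim_ definition above) =====
theorem favorite_sushi_spec : Claim_equal_favorite_sushi := by
  intro sl n _ hpre
  obtain ⟨h1, h2⟩ := hpre
  unfold Spec_favorite_sushi favorite_sushi favorite_sushi_alt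
  exact fs_main sl.length sl (n - 1) 0
    ((sl.length + 1) * (sl.length + 1)) (sl.length + 1)
    rfl (by omega) (by omega) (by omega)
    (by have e : (sl.length + 1) * (sl.length + 1)
          = sl.length * (sl.length + 1) + (sl.length + 1) := by ring
        omega)
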